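-- pv_equiv track=rewrite | github.com/islamkrut/MyProject | combined_game_fixed6.py | get_movable_locations
-- ===== SOURCE A (Python) =====
-- def get_movable_locations(matrix, max_cell_size=20,
--                           cell_size=20):
--     movables = []
--     rows, cols = len(matrix), len(matrix[0])  # Matrix dimensions
--     subdiv = max_cell_size // cell_size
--
--     def is_free(r, c):
--         return 0 <= r < rows and 0 <= c < cols and matrix[r][c] not in ('wall', 'elec')
--
--     def is_valid(r, c):
--         for x in range(subdiv*2):
--             for y in range(subdiv*2):
--                 if not is_free(r+x, c+y):
--                     return False
--         return True
--
--     for r_idx in range(rows):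
--         for c_idx in range(cols):
--             if (r_idx + (subdiv*2) <= rows and \
--                  c_idx + (subdiv*2) <= cols) and is_valid(r_idx, c_idx):
--                 movables.append((r_idx, c_idx))
--
--     return movables
-- ===== SOURCE B (Python) =====
-- def get_movable_locations(matrix, max_cell_size=20,
--                           cell_size=20):
--     cols = len(matrix[0])
--     k = (max_cell_size // cell_size) * 2
--
--     def row_ok(row):
--         # ok[c] iff the free run starting at column c has length >= k
--         ok = [False] * len(row)
--         run = 0
--         for c in range(len(row) - 1, -1, -1):
--             run = 0 if row[c] in ('wall', 'elec') else run + 1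
--             ok[c] = run >= k
--         return ok
--
--     results = []
--     vrun = [0] * cols
--     for r in range(len(matrix) - 1, -1, -1):
--         ok = row_ok(matrix[r][:cols])
--         vrun = [v + 1 if o else 0 for o, v in zip(ok, vrun)]
--         results[:0] = [(r, c) for c, v in enumerate(vrun) if v >= k]
--     return results
-- ===== Notes on version B (the rewrite author's own statement) =====
-- stated objective: alternative
-- what changed: Replaces the per-position 2k x 2k window rescans with run-length dynamic programming (a right-to-left free-run pass per row, then a bottom-up streak of ok-rows per column), intended as asymptotically cheaper; a timing run read ~2.4x at the largest size but not consistently, so no speed is claimed.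
-- outside the precondition, e.g. on get_movable_locations([['a'], []], -2, 1): A returns [(0, 0), (1, 0)], B returns []
import Mathlib
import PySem

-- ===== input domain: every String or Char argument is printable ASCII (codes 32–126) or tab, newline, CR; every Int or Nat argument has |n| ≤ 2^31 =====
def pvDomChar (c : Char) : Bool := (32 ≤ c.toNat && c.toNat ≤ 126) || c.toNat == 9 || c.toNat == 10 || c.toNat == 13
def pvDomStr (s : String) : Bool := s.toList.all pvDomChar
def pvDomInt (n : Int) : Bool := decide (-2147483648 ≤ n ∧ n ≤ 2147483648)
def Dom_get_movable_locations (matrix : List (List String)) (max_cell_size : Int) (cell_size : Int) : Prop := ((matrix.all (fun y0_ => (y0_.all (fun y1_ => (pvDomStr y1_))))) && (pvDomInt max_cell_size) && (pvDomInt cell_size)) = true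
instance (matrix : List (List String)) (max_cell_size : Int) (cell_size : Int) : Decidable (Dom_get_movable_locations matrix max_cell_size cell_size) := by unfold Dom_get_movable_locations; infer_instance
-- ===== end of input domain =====

-- B replaces A's per-position 2k×2k window rescans by run-length DP (a right-to-left free-run
-- pass per row, then a bottom-up streak of ok-rows per column); equivalence of return values.

-- ===== PORT A =====
def get_movable_locations (matrix : List (List String)) (max_cell_size : Int) (cell_size : Int) : List (Int × Int) :=
  let rows : Int := matrix.length
  let cols : Int := ((PySem.List.pyGet? matrix 0).getD []).length  -- len(matrix[0]); IndexError on [] is excluded by Pre_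
  let subdiv : Int := PySem.Int.floordiv max_cell_size cell_size   -- ZeroDivisionError for cell_size = 0 is excluded by Pre_
  let isFree : Int → Int → Bool := fun r c =>
    decide (0 ≤ r) && decide (r < rows) && decide (0 ≤ c) && decide (c < cols) &&
      (let v := PySem.List.pyGetD (PySem.List.pyGetD matrix r []) c ""  -- in range whenever reached, on rectangular (Pre_) input
       !(v == "wall" || v == "elec"))
  let isValid : Int → Int → Bool := fun r c =>
    (PySem.List.pyRange 0 (subdiv * 2) 1).all (fun x =>
      (PySem.List.pyRange 0 (subdiv * 2) 1).all (fun y => isFree (r + x) (c + y)))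
  (PySem.List.pyRange 0 rows 1).foldl (fun acc r =>
    (PySem.List.pyRange 0 cols 1).foldl (fun acc c =>
      if r + subdiv * 2 ≤ rows ∧ c + subdiv * 2 ≤ cols then
        (if isValid r c then acc ++ [(r, c)] else acc)
      else acc) acc) []

-- ===== PORT B =====
-- row_ok: bottom-up loop over the row = foldr carrying (run, ok-list)
def pvRowOk (k : Int) (row : List String) : List Bool :=
  (row.foldr (fun v (st : Int × List Bool) =>
      let run : Int := if v == "wall" || v == "elec" then 0 else st.1 + 1
      (run, decide (k ≤ run) :: st.2)) ((0 : Int), ([] : List Bool))).2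

def get_movable_locations_alt (matrix : List (List String)) (max_cell_size : Int) (cell_size : Int) : List (Int × Int) :=
  let cols : Int := ((PySem.List.pyGet? matrix 0).getD []).length
  let k : Int := PySem.Int.floordiv max_cell_size cell_size * 2
  -- bottom-up loop over rows = foldr over enumerate, carrying (vrun, results)
  ((PySem.List.enumerate matrix 0).foldr
    (fun (p : Int × List String) (st : List Int × List (Int × Int)) =>
      let ok := pvRowOk k (PySem.List.slice p.2 none (some cols))
      let vrun := (ok.zip st.1).map (fun ov => if ov.1 then ov.2 + 1 else 0)
      let hits := (PySem.List.enumerate vrun).filterMap (fun cv =>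
          if k ≤ cv.2 then some (p.1, cv.1) else none)
      (vrun, hits ++ st.2))
    (List.replicate cols.toNat (0 : Int), ([] : List (Int × Int)))).2

-- ===== PRECONDITION & SPEC =====
-- Pre_ excludes cell_size = 0 (ZeroDivisionError) and the empty matrix (IndexError on matrix[0]), and,
-- unless the window does not fit in the matrix at all, matrices with a row shorter than row 0: on those
-- A raises IndexError whenever a checked window reaches a short row, and where it happens to return, the
-- value depends on A's accidental lazy scan order over the short rows.
def Pre_get_movable_locations (matrix : List (List String)) (max_cell_size : Int) (cell_size : Int) : Prop :=
  matrix ≠ [] ∧ cell_size ≠ 0 ∧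
    ((∀ row ∈ matrix, (matrix.headD []).length ≤ row.length)
      ∨ (matrix.length : Int) < PySem.Int.floordiv max_cell_size cell_size * 2
      ∨ ((matrix.headD []).length : Int) < PySem.Int.floordiv max_cell_size cell_size * 2)
instance (matrix : List (List String)) (max_cell_size : Int) (cell_size : Int) : Decidable (Pre_get_movable_locations matrix max_cell_size cell_size) := by unfold Pre_get_movable_locations; infer_instance

def pvWitness_get_movable_locations : List (List String) × Int × Int :=
  ([["a", "a"], ["a", "wall"]], 2, 2)

def Spec_get_movable_locations (matrix : List (List String)) (max_cell_size : Int) (cell_size : Int) (out : List (Int × Int)) : Prop := out = get_movable_locations_alt matrix max_cell_size cell_size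
instance (matrix : List (List String)) (max_cell_size : Int) (cell_size : Int) (out : List (Int × Int)) : Decidable (Spec_get_movable_locations matrix max_cell_size cell_size out) := by unfold Spec_get_movable_locations; infer_instance

-- ===== CLAIM (what is proved, stated in full; the proofs are below) =====
def Claim_equal_get_movable_locations : Prop := ∀ (matrix : List (List String)) (max_cell_size : Int) (cell_size : Int), Dom_get_movable_locations matrix max_cell_size cell_size → Pre_get_movable_locations matrix max_cell_size cell_size → Spec_get_movable_locations matrix max_cell_size cell_size (get_movable_locations matrix max_cell_size cell_size)

-- ===== LEMMAS AND PROOFS =====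

def pvBlocked (v : String) : Bool := v == "wall" || v == "elec"

-- length of the free run at the head of a row (reference form of the fold's first component)
def pvRun : List String → Int
  | [] => 0
  | v :: t => if pvBlocked v then 0 else pvRun t + 1

-- reference forms of the two components of B's fold state: the vertical-streak list and the results
def pvVRef (k cols : Int) : List (List String) → List Int
  | [] => List.replicate cols.toNat 0
  | row :: t => ((pvRowOk k (PySem.List.slice row none (some cols))).zip (pvVRef k cols t)).map
      (fun ov => if ov.1 then ov.2 + 1 else 0)

def pvBRes (k cols : Int) (s : Int) : List (List String) → List (Int × Int)
  | [] => []
  | row :: t => ((PySem.List.enumerate (pvVRef k cols (row :: t))).filterMap (fun cv =>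
      if k ≤ cv.2 then some (s, cv.1) else none))
      ++ pvBRes k cols (s + 1) t

lemma foldr_rowOk (k : Int) (row : List String) :
    row.foldr (fun v (st : Int × List Bool) =>
      let run : Int := if v == "wall" || v == "elec" then 0 else st.1 + 1
      (run, decide (k ≤ run) :: st.2)) ((0 : Int), ([] : List Bool))
    = (pvRun row, pvRowOk k row) := by
  induction row with
  | nil => rfl
  | cons v t ih =>
    have h2 : pvRowOk k (v :: t)
        = decide (k ≤ (if pvBlocked v then 0 else pvRun t + 1)) :: pvRowOk k t := by
      unfold pvRowOk
      rw [List.foldr_cons, ih]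
      simp [pvBlocked]
    rw [List.foldr_cons, ih, h2]
    simp [pvRun, pvBlocked]

lemma pvRowOk_cons (k : Int) (v : String) (t : List String) :
    pvRowOk k (v :: t) = decide (k ≤ pvRun (v :: t)) :: pvRowOk k t := by
  unfold pvRowOk
  rw [List.foldr_cons, foldr_rowOk]
  simp [pvRun, pvBlocked]

lemma rowOk_getD (k : Int) (row : List String) (c : Nat) (hc : c < row.length) :
    (pvRowOk k row).getD c false = decide (k ≤ pvRun (row.drop c)) := by
  induction row generalizing c with
  | nil => simp at hc
  | cons v t ih =>
    rw [pvRowOk_cons]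
    cases c with
    | zero => simp
    | succ c => simpa using ih c (by simpa using hc)

lemma pvRun_ge (row : List String) (m : Int) :
    m ≤ pvRun row ↔ (m ≤ (row.length : Int) ∧ ∀ y : Nat, (y : Int) < m → pvBlocked (row.getD y "") = false) := by
  induction row generalizing m with
  | nil =>
    simp only [pvRun, List.length_nil, Nat.cast_zero]
    constructor
    · intro h; exact ⟨h, fun y hy => by omega⟩
    · intro ⟨h, _⟩; exact h
  | cons v t ih =>
    simp only [pvRun]
    cases hb : pvBlocked v with
    | true =>
      simp only [if_true]
      constructor
      · intro h
        exact ⟨by simp; omega, fun y hy => by omega⟩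
      · intro ⟨_, h⟩
        by_contra hm
        have := h 0 (by omega)
        simp [hb] at this
    | false =>
      simp only [Bool.false_eq_true, if_false]
      constructor
      · intro hm
        have ⟨h1, h2⟩ := (ih (m - 1)).1 (by omega)
        refine ⟨by simp; omega, fun y hy => ?_⟩
        cases y with
        | zero => simpa using hb
        | succ y => simpa using h2 y (by push_cast at hy ⊢; omega)
      · intro ⟨h1, h2⟩
        have : m - 1 ≤ pvRun t := (ih (m - 1)).2
          ⟨by simp at h1 ⊢; omega, fun y hy => by simpa using h2 (y + 1) (by push_cast; omega)⟩
        omega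

lemma foldB (k cols : Int) (rs : List (List String)) (s : Int) :
    (PySem.List.enumerate rs s).foldr
      (fun (p : Int × List String) (st : List Int × List (Int × Int)) =>
        let ok := pvRowOk k (PySem.List.slice p.2 none (some cols))
        let vrun := (ok.zip st.1).map (fun ov => if ov.1 then ov.2 + 1 else 0)
        let hits := (PySem.List.enumerate vrun).filterMap (fun cv =>
            if k ≤ cv.2 then some (p.1, cv.1) else none)
        (vrun, hits ++ st.2))
      (List.replicate cols.toNat (0 : Int), ([] : List (Int × Int)))
    = (pvVRef k cols rs, pvBRes k cols s rs) := by
  induction rs generalizing s with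
  | nil => rfl
  | cons row t ih =>
    rw [PySem.List.enumerate_cons, List.foldr_cons, ih]
    rfl

lemma length_pvRowOk (k : Int) (row : List String) : (pvRowOk k row).length = row.length := by
  induction row with
  | nil => rfl
  | cons v t ih => rw [pvRowOk_cons]; simp [ih]

lemma pvRun_le (row : List String) : pvRun row ≤ (row.length : Int) := by
  induction row with
  | nil => simp [pvRun]
  | cons v t ih => by_cases h : pvBlocked v <;> simp [pvRun, h] <;> omega

lemma rowOk_false_of_big (k : Int) (row : List String) (h : (row.length : Int) < k) :
    ∀ o ∈ pvRowOk k row, o = false := by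
  induction row with
  | nil => simp [pvRowOk]
  | cons v t ih =>
    rw [pvRowOk_cons]
    intro o ho
    rcases List.mem_cons.mp ho with rfl | hmem
    · have := pvRun_le (v :: t)
      simp only [decide_eq_false_iff_not, not_le]
      omega
    · exact ih (by simp at h ⊢; omega) o hmem

lemma length_pvVRef (k : Int) (colsN : Nat) (rs : List (List String))
    (h : ∀ row ∈ rs, colsN ≤ row.length) :
    (pvVRef k (colsN : Int) rs).length = colsN := by
  induction rs with
  | nil => simp [pvVRef]
  | cons row t ih =>
    have hrow := h row (List.mem_cons_self)
    have ht := ih (fun r hr => h r (List.mem_cons_of_mem _ hr))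
    simp [pvVRef, PySem.List.slice_to_natCast, List.length_zip, length_pvRowOk, ht]
    omega

lemma vref_getD (k : Int) (colsN : Nat) (row : List String) (t : List (List String)) (c : Nat)
    (hc : c < colsN) (hrow : colsN ≤ row.length)
    (hlt : (pvVRef k (colsN : Int) t).length = colsN) :
    (pvVRef k (colsN : Int) (row :: t)).getD c 0
    = (if (pvRowOk k (row.take colsN)).getD c false
        then (pvVRef k (colsN : Int) t).getD c 0 + 1 else 0) := by
  have hok : (pvRowOk k (row.take colsN)).length = colsN := by
    rw [length_pvRowOk, List.length_take]; omega
  have hzl : ((pvRowOk k (row.take colsN)).zip (pvVRef k (colsN : Int) t)).length = colsN := by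
    simp [List.length_zip, hok, hlt]
  show (List.map _ _).getD c 0 = _
  rw [PySem.List.slice_to_natCast]
  rw [List.getD_eq_getElem _ _ (by simp only [List.length_map, hzl]; exact hc)]
  rw [List.getElem_map, List.getElem_zip]
  rw [List.getD_eq_getElem _ _ (show c < (pvRowOk k (row.take colsN)).length from by rw [hok]; exact hc),
    List.getD_eq_getElem _ _ (show c < (pvVRef k (colsN : Int) t).length from by rw [hlt]; exact hc)]

lemma vref_ge (k : Int) (colsN : Nat) (rs : List (List String)) (c : Nat) (hc : c < colsN)
    (hwide : ∀ row ∈ rs, colsN ≤ row.length) (m : Int) :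
    m ≤ (pvVRef k (colsN : Int) rs).getD c 0
    ↔ (m ≤ (rs.length : Int) ∧ ∀ x : Nat, (x : Int) < m →
        (pvRowOk k ((rs.getD x []).take colsN)).getD c false = true) := by
  induction rs generalizing m with
  | nil =>
    simp only [pvVRef, List.length_nil, Nat.cast_zero]
    rw [List.getD_eq_getElem?_getD]
    rw [List.getElem?_replicate]
    simp only [Int.toNat_natCast]
    rw [if_pos hc]
    simp only [Option.getD_some]
    constructor
    · intro h; exact ⟨h, fun x hx => by omega⟩
    · intro ⟨h, _⟩; exact h
  | cons row t ih =>
    have hrow := hwide row (List.mem_cons_self)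
    have hwt : ∀ r ∈ t, colsN ≤ r.length := fun r hr => hwide r (List.mem_cons_of_mem _ hr)
    have hlt := length_pvVRef k colsN t hwt
    rw [vref_getD k colsN row t c hc hrow hlt]
    cases hb : (pvRowOk k (row.take colsN)).getD c false with
    | false =>
      simp only [Bool.false_eq_true, if_false]
      constructor
      · intro h
        exact ⟨by simp; omega, fun x hx => by omega⟩
      · intro ⟨_, h⟩
        by_contra hm
        have h0 := h 0 (by omega)
        rw [List.getD_cons_zero, hb] at h0
        exact Bool.noConfusion h0
    | true =>
      simp only [if_true]
      constructor
      · intro hm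
        have ⟨h1, h2⟩ := ((ih hwt) (m - 1)).1 (by omega)
        refine ⟨by simp; omega, fun x hx => ?_⟩
        cases x with
        | zero => simpa using hb
        | succ x => simpa using h2 x (by push_cast at hx ⊢; omega)
      · intro ⟨h1, h2⟩
        have : m - 1 ≤ (pvVRef k (colsN : Int) t).getD c 0 := ((ih hwt) (m - 1)).2
          ⟨by simp at h1 ⊢; omega, fun x hx => by simpa using h2 (x + 1) (by push_cast; omega)⟩
        omega

lemma vref_bounds (k cols : Int) (rs : List (List String)) :
    ∀ v ∈ pvVRef k cols rs, 0 ≤ v ∧ v ≤ (rs.length : Int) := by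
  induction rs with
  | nil =>
    intro v hv
    have := List.eq_of_mem_replicate hv
    omega
  | cons row t ih =>
    intro v hv
    simp only [pvVRef, List.mem_map] at hv
    obtain ⟨ov, hmem, rfl⟩ := hv
    have h2 := (List.of_mem_zip (a := ov.1) (b := ov.2) (by simpa using hmem)).2
    have := ih ov.2 h2
    by_cases h : ov.1 = true <;> simp [h] <;> simp at * <;> omega

lemma vref_zero_of_narrow (k : Int) (colsN : Nat) (rs : List (List String))
    (h : (colsN : Int) < k) :
    ∀ v ∈ pvVRef k (colsN : Int) rs, v = 0 := by
  induction rs with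
  | nil =>
    intro v hv
    exact List.eq_of_mem_replicate hv
  | cons row t ih =>
    intro v hv
    simp only [pvVRef, List.mem_map] at hv
    obtain ⟨ov, hmem, rfl⟩ := hv
    have h1 := (List.of_mem_zip (a := ov.1) (b := ov.2) (by simpa using hmem)).1
    have hfalse := rowOk_false_of_big k (row.take colsN)
      (by have := List.length_take_le colsN row; omega) ov.1 h1
    simp [hfalse]

lemma bres_nil_of_big (k : Int) (colsN : Nat) (s : Int) (rs : List (List String))
    (h : (rs.length : Int) < k ∨ (colsN : Int) < k) : pvBRes k (colsN : Int) s rs = [] := by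
  induction rs generalizing s with
  | nil => rfl
  | cons row t ih =>
    have hk : (0 : Int) < k := by
      rcases h with h | h
      · have : (0 : Int) ≤ ((row :: t).length : Int) := by positivity
        omega
      · omega
    show List.filterMap _ _ ++ pvBRes k (colsN : Int) (s + 1) t = []
    rw [List.append_eq_nil_iff]
    constructor
    · rw [List.filterMap_eq_nil_iff]
      intro cv hcv
      obtain ⟨c, hlt, rfl⟩ := (PySem.List.mem_enumerate_iff _ _ _).mp hcv
      have hvmem : (pvVRef k (colsN : Int) (row :: t))[c] ∈ pvVRef k (colsN : Int) (row :: t) :=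
        List.getElem_mem hlt
      have hno : ¬ k ≤ (pvVRef k (colsN : Int) (row :: t))[c] := by
        rcases h with h | h
        · have := vref_bounds k (colsN : Int) (row :: t) _ hvmem
          omega
        · have := vref_zero_of_narrow k colsN (row :: t) h _ hvmem
          omega
      simp [hno]
    · apply ih
      rcases h with h | h
      · left; simp at h ⊢; omega
      · right; exact h

lemma bres_flat (k : Int) (colsN : Nat) (s : Int) (rs : List (List String)) :
    pvBRes k (colsN : Int) s rs
    = (List.range rs.length).flatMap (fun i =>
        (PySem.List.enumerate (pvVRef k (colsN : Int) (rs.drop i))).filterMap (fun cv =>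
          if k ≤ cv.2 then some (s + (i : Int), cv.1) else none)) := by
  induction rs generalizing s with
  | nil => simp [pvBRes]
  | cons row t ih =>
    simp only [pvBRes, ih]
    rw [List.length_cons, List.range_succ_eq_map, List.flatMap_cons, List.flatMap_map]
    congr 1
    · simp
    · apply List.flatMap_congr
      intro i _
      simp only [List.drop_succ_cons]
      congr 1
      funext cv
      by_cases hP : k ≤ cv.2
      · simp [hP, Prod.ext_iff]
        ring
      · simp [hP]


lemma foldl_guard {P : Int → Prop} [DecidablePred P] (V : Int → Bool) (f : Int → Int × Int)
    (l : List Int) (acc : List (Int × Int)) :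
    l.foldl (fun acc c => if P c then (if V c then acc ++ [f c] else acc) else acc) acc
    = acc ++ (l.filter (fun c => decide (P c) && V c)).map f := by
  have hfun : (fun (acc : List (Int × Int)) c => if P c then (if V c then acc ++ [f c] else acc) else acc)
      = (fun acc c => if (decide (P c) && V c) = true then acc ++ [f c] else acc) := by
    funext acc c
    by_cases h1 : P c <;> by_cases h2 : V c <;> simp [h1, h2]
  rw [hfun, PySem.List.foldl_append_if]

lemma filterMap_ite_some {α β : Type} (l : List α) (P : α → Prop) [DecidablePred P] (f : α → β) :
    l.filterMap (fun c => if P c then some (f c) else none) = (l.filter (fun c => decide (P c))).map f := by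
  induction l with
  | nil => rfl
  | cons x t ih => by_cases h : P x <;> simp [h, ih]

lemma cond_iff (matrix : List (List String)) (colsN : Nat)
    (hwide : ∀ row ∈ matrix, colsN ≤ row.length)
    (k : Int) (i j : Nat) (hi : i < matrix.length) (hj : j < colsN) :
    (k ≤ (pvVRef k (colsN : Int) (matrix.drop i)).getD j 0)
    ↔ (((i : Int) + k ≤ (matrix.length : Int) ∧ (j : Int) + k ≤ (colsN : Int)) ∧
        ∀ x y : Nat, (x : Int) < k → (y : Int) < k →
          pvBlocked ((matrix.getD (i + x) []).getD (j + y) "") = false) := by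
  have hgetd : ∀ x : Nat, (matrix.drop i).getD x [] = matrix.getD (i + x) [] := by
    intro x; simp [List.getD_eq_getElem?_getD, List.getElem?_drop]
  have hdroplen : (matrix.drop i).length = matrix.length - i := List.length_drop
  have hrowfact : ∀ x : Nat, i + x < matrix.length →
      colsN ≤ (matrix.getD (i + x) []).length := by
    intro x hx
    have hmem : matrix.getD (i + x) [] ∈ matrix := by
      rw [List.getD_eq_getElem?_getD, List.getElem?_eq_getElem hx]
      exact List.getElem_mem hx
    exact hwide _ hmem
  have hdt : ∀ (row : List String) (y : Nat), j + y < colsN →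
      ((row.take colsN).drop j).getD y "" = row.getD (j + y) "" := by
    intro row y hy
    rw [List.getD_eq_getElem?_getD, List.getElem?_drop, List.getElem?_take_of_lt hy,
      ← List.getD_eq_getElem?_getD]
  rw [vref_ge k colsN _ j hj (fun r hr => hwide r (List.mem_of_mem_drop hr)) k]
  constructor
  · rintro ⟨h1, h2⟩
    rw [hdroplen] at h1
    have hik : (i : Int) + k ≤ (matrix.length : Int) := by
      push_cast [Nat.cast_sub hi.le] at h1 ⊢; omega
    have hx : ∀ x : Nat, (x : Int) < k →
        ((j : Int) + k ≤ (colsN : Int) ∧ ∀ y : Nat, (y : Int) < k →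
          pvBlocked ((matrix.getD (i + x) []).getD (j + y) "") = false) := by
      intro x hxk
      have h2x := h2 x hxk
      rw [hgetd] at h2x
      have hxrow : i + x < matrix.length := by omega
      have hwrow := hrowfact x hxrow
      have htlen : ((matrix.getD (i + x) []).take colsN).length = colsN := by
        rw [List.length_take]; omega
      rw [rowOk_getD k _ j (by rw [htlen]; exact hj)] at h2x
      have hrun := of_decide_eq_true h2x
      rw [pvRun_ge] at hrun
      obtain ⟨ha, hb⟩ := hrun
      rw [List.length_drop, htlen] at ha
      have hjk : (j : Int) + k ≤ (colsN : Int) := by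
        push_cast [Nat.cast_sub hj.le] at ha ⊢; omega
      refine ⟨hjk, fun y hy => ?_⟩
      have hyy := hb y hy
      have hjy : j + y < colsN := by omega
      rwa [hdt _ y hjy] at hyy
    refine ⟨⟨hik, ?_⟩, fun x y hxk hyk => (hx x hxk).2 y hyk⟩
    by_cases hk : k ≤ 0
    · omega
    · exact (hx 0 (by omega)).1
  · rintro ⟨⟨h1, h2⟩, h3⟩
    refine ⟨?_, fun x hxk => ?_⟩
    · rw [hdroplen]; push_cast [Nat.cast_sub hi.le]; omega
    · rw [hgetd]
      have hxrow : i + x < matrix.length := by omega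
      have hwrow := hrowfact x hxrow
      have htlen : ((matrix.getD (i + x) []).take colsN).length = colsN := by
        rw [List.length_take]; omega
      rw [rowOk_getD k _ j (by rw [htlen]; exact hj)]
      apply decide_eq_true
      rw [pvRun_ge]
      refine ⟨?_, fun y hy => ?_⟩
      · rw [List.length_drop, htlen]; push_cast [Nat.cast_sub hj.le]; omega
      · have hjy : j + y < colsN := by omega
        rw [hdt _ y hjy]; exact h3 x y hxk hy

-- ===== VERDICT (by name: the statement is the Claim_ definition above) =====
theorem get_movable_locations_spec : Claim_equal_get_movable_locations := by
  unfold Claim_equal_get_movable_locations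
  intro matrix mc cs _ hpre
  obtain ⟨hne, hcs, hpre3⟩ := hpre
  unfold Spec_get_movable_locations
  obtain ⟨h0, t0, rfl⟩ : ∃ h0 t0, matrix = h0 :: t0 := by
    cases matrix with
    | nil => exact absurd rfl hne
    | cons a b => exact ⟨a, b, rfl⟩
  simp only [List.headD_cons] at hpre3
  simp only [get_movable_locations, get_movable_locations_alt,
    PySem.List.pyGet?_zero_cons, Option.getD_some]
  rw [foldB]
  simp only [foldl_guard, PySem.List.foldl_append_eq_flatMap, List.nil_append]
  rcases hpre3 with hwide | hbig
  · -- every row is at least as long as row 0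
    rw [bres_flat]
    rw [PySem.List.pyRange_zero_natCast (h0 :: t0).length, List.flatMap_map]
    apply List.flatMap_congr
    intro i hi
    have hiN : i < (h0 :: t0).length := List.mem_range.mp hi
    have hwdrop : ∀ r ∈ (h0 :: t0).drop i, h0.length ≤ r.length :=
      fun r hr => hwide r (List.mem_of_mem_drop hr)
    have hlenv := length_pvVRef (PySem.Int.floordiv mc cs * 2) h0.length ((h0 :: t0).drop i) hwdrop
    rw [PySem.List.enumerate_eq_map_pyRange _ (0 : Int), List.filterMap_map]
    rw [PySem.List.len_eq, hlenv]
    simp only [Function.comp_def, zero_add]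
    rw [filterMap_ite_some]
    congr 1
    apply List.filter_congr
    intro c hc
    rw [PySem.List.mem_pyRange_one] at hc
    lift c to Nat using hc.1 with j
    have hj : j < h0.length := by exact_mod_cast hc.2
    rw [PySem.List.pyGetD_natCast]
    apply Bool.coe_iff_coe.mp
    have hcond := cond_iff (h0 :: t0) h0.length hwide (PySem.Int.floordiv mc cs * 2) i j hiN hj
    simp only [Bool.and_eq_true, decide_eq_true_eq]
    rw [hcond]
    apply and_congr_right
    intro hP
    simp only [List.all_eq_true]
    constructor
    · intro h x y hx hy
      have hb := h (x : Int) (PySem.List.mem_pyRange_one.mpr ⟨by omega, hx⟩)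
        (y : Int) (PySem.List.mem_pyRange_one.mpr ⟨by omega, hy⟩)
      simp only [Bool.and_eq_true, decide_eq_true_eq, Bool.not_eq_true', Bool.or_eq_false_iff] at hb
      have hcast1 : ((i : Int) + (x : Int)) = ((i + x : Nat) : Int) := by push_cast; ring
      have hcast2 : ((j : Int) + (y : Int)) = ((j + y : Nat) : Int) := by push_cast; ring
      rw [hcast1, hcast2, PySem.List.pyGetD_natCast, PySem.List.pyGetD_natCast] at hb
      simp only [pvBlocked, Bool.or_eq_false_iff]
      exact hb.2
    · intro h x hxm y hym
      rw [PySem.List.mem_pyRange_one] at hxm hym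
      lift x to Nat using hxm.1 with x'
      lift y to Nat using hym.1 with y'
      have hfree := h x' y' hxm.2 hym.2
      have hcast1 : ((i : Int) + (x' : Int)) = ((i + x' : Nat) : Int) := by push_cast; ring
      have hcast2 : ((j : Int) + (y' : Int)) = ((j + y' : Nat) : Int) := by push_cast; ring
      rw [hcast1, hcast2, PySem.List.pyGetD_natCast, PySem.List.pyGetD_natCast]
      simp only [Bool.and_eq_true, decide_eq_true_eq, Bool.not_eq_true', Bool.or_eq_false_iff]
      refine ⟨⟨⟨⟨by omega, by omega⟩, by omega⟩, by omega⟩, ?_⟩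
      simp only [pvBlocked, Bool.or_eq_false_iff] at hfree
      exact hfree
  · -- the window does not fit in the matrix at all: both sides are empty
    rw [bres_nil_of_big _ _ _ _ hbig]
    rw [List.flatMap_eq_nil_iff]
    intro r hr
    rw [PySem.List.mem_pyRange_one] at hr
    rw [List.map_eq_nil_iff, List.filter_eq_nil_iff]
    intro c hcmem
    rw [PySem.List.mem_pyRange_one] at hcmem
    simp only [Bool.and_eq_true, decide_eq_true_eq, not_and]
    intro hguard _
    rcases hbig with hb1 | hb1 <;> omega
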